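-- pv_equiv track=rewrite | github.com/geekxh/hello-algorithm | showmecode_100/python/array/longestsamesumspan.py | longest_span
-- ===== SOURCE A (Python) =====
-- def longest_span(input1, input2):
--     if len(input1) != len(input2):
--         raise ValueError;
--
--     diff = {}
--     prefix1 = 0
--     prefix2 = 0
--     max_span = 0
--     diff[0] = -1
--     for i in range(len(input1)):
--         prefix1 += input1[i]
--         prefix2 += input2[i]
--         curr_diff = prefix1 - prefix2
--         if curr_diff in diff:
--             max_span = max(max_span, i - diff[curr_diff])
--         else:
--             diff[curr_diff] = i
--     return max_span
-- ===== SOURCE B (Python) =====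
-- def longest_span(input1, input2):
--     if len(input1) != len(input2):
--         raise ValueError
--
--     n = len(input1)
--     max_span = 0
--     for s in range(n):
--         sum1 = 0
--         sum2 = 0
--         for e in range(s, n):
--             sum1 += input1[e]
--             sum2 += input2[e]
--             if sum1 == sum2:
--                 max_span = max(max_span, e - s + 1)
--     return max_span
-- ===== Notes on version B (the rewrite author's own statement) =====
-- stated objective: alternative
-- what changed: Replaced the prefix-difference hash map (first-occurrence dictionary, one pass) by a direct brute-force scan over all windows with running sums; no dictionary and no prefix arrays are kept.
import Mathlib
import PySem

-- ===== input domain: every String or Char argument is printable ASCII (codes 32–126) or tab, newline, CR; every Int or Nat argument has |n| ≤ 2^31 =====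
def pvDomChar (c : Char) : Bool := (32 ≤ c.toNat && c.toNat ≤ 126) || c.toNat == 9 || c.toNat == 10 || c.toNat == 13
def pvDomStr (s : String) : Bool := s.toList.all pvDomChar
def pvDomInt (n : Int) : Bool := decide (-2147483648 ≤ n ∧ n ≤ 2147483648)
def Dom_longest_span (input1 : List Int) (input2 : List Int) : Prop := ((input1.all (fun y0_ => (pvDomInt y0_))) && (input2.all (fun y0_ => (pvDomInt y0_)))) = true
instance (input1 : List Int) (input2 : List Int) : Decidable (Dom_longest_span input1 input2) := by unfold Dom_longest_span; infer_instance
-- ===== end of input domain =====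

-- B replaces A's one-pass prefix-difference dictionary by a brute-force double loop with
-- running window sums (alternative algorithm, no dictionary); same ValueError on unequal lengths.

-- ===== PORT A =====
def longest_span (input1 : List Int) (input2 : List Int) : Int :=
  if input1.length ≠ input2.length then 0  -- Python raises ValueError here (excluded by Pre_)
  else
    let st := (PySem.List.pyRange 0 (input1.length : Int) 1).foldl
      (fun (st : PySem.Dict Int Int × Int × Int × Int) i =>
        let diff := st.1
        let prefix1 := st.2.1 + PySem.List.pyGetD input1 i 0
        let prefix2 := st.2.2.1 + PySem.List.pyGetD input2 i 0
        let curr_diff := prefix1 - prefix2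
        match diff.get? curr_diff with
        | some j => (diff, prefix1, prefix2, max st.2.2.2 (i - j))
        | none => (diff.insert curr_diff i, prefix1, prefix2, st.2.2.2))
      ((PySem.Dict.empty).insert 0 (-1), 0, 0, 0)
    st.2.2.2

-- ===== PORT B =====
def longest_span_alt (input1 : List Int) (input2 : List Int) : Int :=
  if input1.length ≠ input2.length then 0  -- Python raises ValueError here (excluded by Pre_)
  else
    (PySem.List.pyRange 0 (input1.length : Int) 1).foldl
      (fun ms s =>
        ((PySem.List.pyRange s (input1.length : Int) 1).foldl
          (fun (st : Int × Int × Int) e =>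
            let sum1 := st.1 + PySem.List.pyGetD input1 e 0
            let sum2 := st.2.1 + PySem.List.pyGetD input2 e 0
            (sum1, sum2, if sum1 = sum2 then max st.2.2 (e - s + 1) else st.2.2))
          (0, 0, ms)).2.2)
      0

-- ===== PRECONDITION & SPEC =====
-- Pre_ excludes exactly the inputs of unequal length, on which Python A raises ValueError.
def Pre_longest_span (input1 : List Int) (input2 : List Int) : Prop :=
  input1.length = input2.length
instance (input1 : List Int) (input2 : List Int) : Decidable (Pre_longest_span input1 input2) := by
  unfold Pre_longest_span; infer_instance

def pvWitness_longest_span : List Int × List Int := ([1, 2, 0], [2, 1, 5])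

def Spec_longest_span (input1 : List Int) (input2 : List Int) (out : Int) : Prop := out = longest_span_alt input1 input2
instance (input1 : List Int) (input2 : List Int) (out : Int) : Decidable (Spec_longest_span input1 input2 out) := by unfold Spec_longest_span; infer_instance

-- ===== CLAIM (what is proved, stated in full; the proofs are below) =====
def Claim_equal_longest_span : Prop := ∀ (input1 : List Int) (input2 : List Int), Dom_longest_span input1 input2 → Pre_longest_span input1 input2 → Spec_longest_span input1 input2 (longest_span input1 input2)

-- ===== LEMMAS AND PROOFS =====

-- prefix-sum difference after k elements
def pvD (xs ys : List Int) (k : Nat) : Int := ((xs.take k).sum) - ((ys.take k).sum)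

-- characterisation of the answer: r is the maximum of 0 and all (t - s) over equal-diff pairs s < t ≤ n
def pvGood (xs ys : List Int) (n : Nat) (r : Int) : Prop :=
  0 ≤ r ∧
  (∀ s t : Nat, s < t → t ≤ n → pvD xs ys s = pvD xs ys t → (t : Int) - (s : Int) ≤ r) ∧
  (r = 0 ∨ ∃ s t : Nat, s < t ∧ t ≤ n ∧ pvD xs ys s = pvD xs ys t ∧ r = (t : Int) - (s : Int))

theorem pv_take_succ_sum (xs : List Int) (j : Nat) :
    (xs.take (j+1)).sum = (xs.take j).sum + xs.getD j 0 := by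
  induction xs generalizing j with
  | nil => simp
  | cons a l ih => cases j <;> simp [ih] <;> try ring

theorem pv_good_unique (xs ys : List Int) (n : Nat) {r r' : Int}
    (h : pvGood xs ys n r) (h' : pvGood xs ys n r') : r = r' := by
  obtain ⟨h0, hb, he⟩ := h
  obtain ⟨h0', hb', he'⟩ := h'
  have le1 : r ≤ r' := by
    rcases he with rfl | ⟨s, t, hst, htn, hd, rfl⟩
    · exact h0'
    · exact hb' s t hst htn hd
  have le2 : r' ≤ r := by
    rcases he' with rfl | ⟨s, t, hst, htn, hd, rfl⟩
    · exact h0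
    · exact hb s t hst htn hd
  omega

-- "conditional max" fold and its characterisation
def pvMIF (P : Nat → Bool) (f : Nat → Int) (l : List Nat) (a : Int) : Int :=
  l.foldl (fun ms k => if P k then max ms (f k) else ms) a

theorem pvMIF_infl (P : Nat → Bool) (f : Nat → Int) (l : List Nat) (a : Int) :
    a ≤ pvMIF P f l a := by
  induction l generalizing a with
  | nil => simp [pvMIF]
  | cons x l ih =>
    refine le_trans ?_ (ih (if P x then max a (f x) else a))
    split <;> simp

theorem pvMIF_ge (P : Nat → Bool) (f : Nat → Int) (l : List Nat) (a : Int)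
    {k : Nat} (hk : k ∈ l) (hP : P k = true) : f k ≤ pvMIF P f l a := by
  induction l generalizing a with
  | nil => simp at hk
  | cons x l ih =>
    rcases List.mem_cons.mp hk with rfl | hk'
    · refine le_trans ?_ (pvMIF_infl P f l _)
      simp [hP]
    · exact ih _ hk' 

theorem pvMIF_cases (P : Nat → Bool) (f : Nat → Int) (l : List Nat) (a : Int) :
    pvMIF P f l a = a ∨ ∃ k ∈ l, P k = true ∧ pvMIF P f l a = f k := by
  induction l generalizing a with
  | nil => left; rfl
  | cons x l ih =>
    have step : pvMIF P f (x :: l) a = pvMIF P f l (if P x then max a (f x) else a) := rfl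
    rcases ih (if P x then max a (f x) else a) with h | ⟨k, hk, hPk, hval⟩
    · rw [step, h]
      by_cases hx : P x = true
      · rcases max_choice a (f x) with hm | hm
        · left; simp [hx, hm]
        · right; exact ⟨x, List.mem_cons_self, hx, by simp [hx, hm]⟩
      · left; simp [hx]
    · right; exact ⟨k, List.mem_cons_of_mem _ hk, hPk, by rw [step, hval]⟩

-- generic fold facts over an Int accumulator
theorem pv_foldl_infl {g : Int → Nat → Int} (hg : ∀ a k, a ≤ g a k) (l : List Nat) (a : Int) :
    a ≤ l.foldl g a := by
  induction l generalizing a with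
  | nil => simp
  | cons x l ih => exact le_trans (hg a x) (ih (g a x))

theorem pv_foldl_ge_of_mem {g : Int → Nat → Int} (hg : ∀ a k, a ≤ g a k) {k : Nat} {x : Int}
    (hx : ∀ a, x ≤ g a k) (l : List Nat) (a : Int) (hk : k ∈ l) : x ≤ l.foldl g a := by
  induction l generalizing a with
  | nil => simp at hk
  | cons y l ih =>
    rcases List.mem_cons.mp hk with rfl | hk'
    · exact le_trans (hx a) (pv_foldl_infl hg l _)
    · exact ih _ hk' 

theorem pv_foldl_inv {g : Int → Nat → Int} {Q : Int → Prop} (l : List Nat) (a : Int)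
    (hstep : ∀ a k, k ∈ l → Q a → Q (g a k)) (ha : Q a) : Q (l.foldl g a) := by
  induction l generalizing a with
  | nil => exact ha
  | cons x l ih =>
    exact ih _ (fun a k hk => hstep a k (List.mem_cons_of_mem _ hk))
      (hstep a x List.mem_cons_self ha)

-- B's inner loop computes a conditional-max fold over the window ends
theorem pv_inner (xs ys : List Int) (s : Nat) :
    ∀ (m j : Nat) (ms : Int), j + m = xs.length →
    ((PySem.List.pyRange (j : Int) (xs.length : Int) 1).foldl
      (fun (st : Int × Int × Int) e =>
        let sum1 := st.1 + PySem.List.pyGetD xs e 0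
        let sum2 := st.2.1 + PySem.List.pyGetD ys e 0
        (sum1, sum2, if sum1 = sum2 then max st.2.2 (e - (s : Int) + 1) else st.2.2))
      ((xs.take j).sum - (xs.take s).sum, (ys.take j).sum - (ys.take s).sum, ms)).2.2
    = pvMIF (fun k => pvD xs ys (j+k+1) == pvD xs ys s)
        (fun k => ((j : Int) + k + 1) - s) (List.range m) ms := by
  intro m
  induction m with
  | zero =>
    intro j ms hj
    rw [PySem.List.pyRange_one_eq_nil (by omega)]
    simp [pvMIF]
  | succ m ih =>
    intro j ms hj
    have hjlt : (j : Int) < (xs.length : Int) := by omega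
    rw [PySem.List.pyRange_one_cons hjlt]
    rw [List.foldl_cons]
    have hx1 : (xs.take j).sum - (xs.take s).sum + PySem.List.pyGetD xs (j : Int) 0
        = (xs.take (j+1)).sum - (xs.take s).sum := by
      rw [PySem.List.pyGetD_natCast, pv_take_succ_sum]; ring
    have hx2 : (ys.take j).sum - (ys.take s).sum + PySem.List.pyGetD ys (j : Int) 0
        = (ys.take (j+1)).sum - (ys.take s).sum := by
      rw [PySem.List.pyGetD_natCast, pv_take_succ_sum]; ring
    simp only [hx1, hx2]
    have hcond : ((xs.take (j+1)).sum - (xs.take s).sum = (ys.take (j+1)).sum - (ys.take s).sum)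
        ↔ (pvD xs ys (j+1) = pvD xs ys s) := by
      unfold pvD; constructor <;> intro h <;> linarith
    rw [if_congr hcond rfl rfl]
    have hcast : (j : Int) + 1 = ((j + 1 : Nat) : Int) := by push_cast; ring
    rw [hcast]
    rw [ih (j+1) _ (by omega)]
    -- both sides are pvMIF folds; align index shifts
    rw [List.range_succ_eq_map]
    unfold pvMIF
    rw [List.foldl_cons, List.foldl_map]
    have harg : ∀ k : Nat, j + Nat.succ k + 1 = (j + 1) + k + 1 := by omega
    have hargI : ∀ k : Nat, (j : Int) + (Nat.succ k : Int) + 1 = ((j+1 : Nat) : Int) + k + 1 := by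
      intro k; push_cast; ring
    have hfun : (fun (ms : Int) (k : Nat) =>
          if (pvD xs ys (j + Nat.succ k + 1) == pvD xs ys s) = true then
            max ms ((j : Int) + (Nat.succ k : Int) + 1 - s) else ms)
        = (fun (ms : Int) (k : Nat) =>
          if (pvD xs ys ((j+1) + k + 1) == pvD xs ys s) = true then
            max ms (((j+1 : Nat) : Int) + k + 1 - s) else ms) := by
      funext ms k
      rw [harg k, hargI k]
    rw [hfun]
    have hval0 : ((j : Int) + ((0 : Nat) : Int) + 1 - s) = (j : Int) - s + 1 := by push_cast; ring
    simp only [Nat.add_zero, hval0, beq_iff_eq]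

-- B's inner loop never decreases the running maximum
theorem pv_inner_infl (xs ys : List Int) (s : Int) (l : List Int) (st : Int × Int × Int) :
    st.2.2 ≤ (l.foldl
      (fun (st : Int × Int × Int) e =>
        let sum1 := st.1 + PySem.List.pyGetD xs e 0
        let sum2 := st.2.1 + PySem.List.pyGetD ys e 0
        (sum1, sum2, if sum1 = sum2 then max st.2.2 (e - s + 1) else st.2.2)) st).2.2 := by
  induction l generalizing st with
  | nil => simp
  | cons e l ih =>
    refine le_trans ?_ (ih _)
    simp only
    split
    · exact le_max_left _ _
    · exact le_refl _

-- B computes a pvGood value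
theorem pv_alt_good (xs ys : List Int) (hlen : xs.length = ys.length) :
    pvGood xs ys xs.length (longest_span_alt xs ys) := by
  unfold longest_span_alt
  rw [if_neg (by omega)]
  rw [PySem.List.pyRange_one]
  simp only [sub_zero, Int.toNat_natCast, List.foldl_map, zero_add]
  have hG : ∀ (a : Int) (s : Nat), s ≤ xs.length →
      ((PySem.List.pyRange (s : Int) (xs.length : Int) 1).foldl
        (fun (st : Int × Int × Int) e =>
          let sum1 := st.1 + PySem.List.pyGetD xs e 0
          let sum2 := st.2.1 + PySem.List.pyGetD ys e 0
          (sum1, sum2, if sum1 = sum2 then max st.2.2 (e - (s : Int) + 1) else st.2.2))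
        (0, 0, a)).2.2
      = pvMIF (fun k => pvD xs ys (s+k+1) == pvD xs ys s)
          (fun k => ((s : Int) + k + 1) - s) (List.range (xs.length - s)) a := by
    intro a s hs
    have h0 : ((0 : Int), (0 : Int), a)
        = ((xs.take s).sum - (xs.take s).sum, (ys.take s).sum - (ys.take s).sum, a) := by simp
    rw [h0, pv_inner xs ys s (xs.length - s) s a (by omega)]
  have hinfl : ∀ (a : Int) (k : Nat), a ≤
      ((PySem.List.pyRange (k : Int) (xs.length : Int) 1).foldl
        (fun (st : Int × Int × Int) e =>
          let sum1 := st.1 + PySem.List.pyGetD xs e 0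
          let sum2 := st.2.1 + PySem.List.pyGetD ys e 0
          (sum1, sum2, if sum1 = sum2 then max st.2.2 (e - (k : Int) + 1) else st.2.2))
        (0, 0, a)).2.2 :=
    fun a k => pv_inner_infl xs ys k _ (0, 0, a)
  refine ⟨?_, ?_, ?_⟩
  · exact pv_foldl_infl hinfl _ 0
  · intro s t hst htn hdiff
    refine pv_foldl_ge_of_mem hinfl (k := s) ?_ _ 0 (List.mem_range.mpr (by omega))
    intro a
    rw [hG a s (by omega)]
    have hkval : ((s : Int) + ((t - s - 1 : Nat) : Int) + 1) - s = (t : Int) - s := by omega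
    have hkP : (pvD xs ys (s + (t - s - 1) + 1) == pvD xs ys s) = true := by
      rw [show s + (t - s - 1) + 1 = t by omega]
      simp [hdiff.symm]
    calc (t : Int) - s = (s : Int) + ((t - s - 1 : Nat) : Int) + 1 - s := hkval.symm
      _ ≤ _ := pvMIF_ge _ _ _ _ (List.mem_range.mpr (by omega)) hkP
  · refine pv_foldl_inv (Q := fun r => r = 0 ∨ ∃ s t : Nat, s < t ∧ t ≤ xs.length ∧
        pvD xs ys s = pvD xs ys t ∧ r = (t : Int) - (s : Int)) _ 0 ?_ (Or.inl rfl)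
    intro a k hk hQ
    rw [hG a k (by have := List.mem_range.mp hk; omega)]
    rcases pvMIF_cases (fun k' => pvD xs ys (k+k'+1) == pvD xs ys k)
        (fun k' => ((k : Int) + k' + 1) - k) (List.range (xs.length - k)) a with h | ⟨k', hk', hP, hval⟩
    · rw [h]; exact hQ
    · right
      refine ⟨k, k + k' + 1, by omega, by have := List.mem_range.mp hk'; omega, ?_, ?_⟩
      · exact (beq_iff_eq.mp hP).symm
      · rw [hval]; omega

-- A's loop step over Nat indices (the port's loop after range/index normalisation)
def pvStepA (xs ys : List Int) (st : PySem.Dict Int Int × Int × Int × Int) (i : Nat) :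
    PySem.Dict Int Int × Int × Int × Int :=
  let prefix1 := st.2.1 + xs.getD i 0
  let prefix2 := st.2.2.1 + ys.getD i 0
  let curr := prefix1 - prefix2
  match st.1.get? curr with
  | some j => (st.1, prefix1, prefix2, max st.2.2.2 ((i : Int) - j))
  | none => (st.1.insert curr (i : Int), prefix1, prefix2, st.2.2.2)

def pvInitA : PySem.Dict Int Int × Int × Int × Int :=
  ((PySem.Dict.empty).insert 0 (-1), 0, 0, 0)

theorem pv_A_eq (xs ys : List Int) (hlen : xs.length = ys.length) :
    longest_span xs ys = ((List.range xs.length).foldl (pvStepA xs ys) pvInitA).2.2.2 := by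
  unfold longest_span
  rw [if_neg (by omega)]
  rw [PySem.List.pyRange_one]
  simp only [sub_zero, Int.toNat_natCast, List.foldl_map, zero_add,
    PySem.List.pyGetD_natCast]
  rfl

def pvInvA (xs ys : List Int) (i : Nat) (st : PySem.Dict Int Int × Int × Int × Int) : Prop :=
  st.2.1 = (xs.take i).sum ∧ st.2.2.1 = (ys.take i).sum ∧
  (∀ v : Int, st.1.get? v =
      ((List.range (i+1)).find? (fun k => pvD xs ys k == v)).map (fun k : Nat => (k : Int) - 1)) ∧
  pvGood xs ys i st.2.2.2

theorem pv_stepA_spec (xs ys : List Int) (st : PySem.Dict Int Int × Int × Int × Int)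
    (i : Nat) (h : pvInvA xs ys i st) : pvInvA xs ys (i+1) (pvStepA xs ys st i) := by
  obtain ⟨h1, h2, hd, hg0, hgb, hge⟩ := h
  have hcurr : st.2.1 + xs.getD i 0 - (st.2.2.1 + ys.getD i 0) = pvD xs ys (i+1) := by
    rw [h1, h2, pvD, pv_take_succ_sum, pv_take_succ_sum]
  have hp1 : st.2.1 + xs.getD i 0 = (xs.take (i+1)).sum := by rw [h1, pv_take_succ_sum]
  have hp2 : st.2.2.1 + ys.getD i 0 = (ys.take (i+1)).sum := by rw [h2, pv_take_succ_sum]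
  simp only [pvStepA, hcurr]
  split
  case h_1 jv heq =>
    -- jv = (first index with this diff) - 1
    have hmap := (hd (pvD xs ys (i+1))).symm.trans heq
    rw [Option.map_eq_some_iff] at hmap
    obtain ⟨s0, hfind, hjv⟩ := hmap
    rw [List.find?_eq_some_iff_getElem] at hfind
    obtain ⟨hP0, idx, hidx, hel, hmin⟩ := hfind
    rw [List.getElem_range] at hel
    subst hel
    have hs0le : idx ≤ i := by simpa using hidx
    have hs0d : pvD xs ys idx = pvD xs ys (i+1) := beq_iff_eq.mp hP0
    have hminD : ∀ s : Nat, s < idx → pvD xs ys s ≠ pvD xs ys (i+1) := by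
      intro s hs hcontra
      have := hmin s hs
      rw [List.getElem_range] at this
      simp [hcontra] at this
    have hval : (i : Int) - jv = ((i+1 : Nat) : Int) - idx := by
      rw [← hjv]; push_cast; ring
    refine ⟨hp1, hp2, ?_, ?_, ?_, ?_⟩
    · -- dict is unchanged; the new index i+1 never extends a find? that already succeeded,
      -- and cannot start succeeding at a value ≠ pvD (i+1)
      intro v
      rw [show i+1+1 = (i+1)+1 from rfl, List.range_succ, List.find?_append]
      rcases hfv : (List.range (i+1)).find? (fun k => pvD xs ys k == v) with _ | w
      · have hvne : ¬ (pvD xs ys (i+1) == v) = true := by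
          intro hvv
          rw [beq_iff_eq] at hvv
          subst hvv
          rw [List.find?_eq_none] at hfv
          exact hfv idx (List.mem_range.mpr (by omega)) hP0
        rw [hd v, hfv]
        simp [List.find?, hvne]
      · rw [hd v, hfv]
        simp
    · exact le_trans hg0 (le_max_left _ _)
    · intro s t hst htn hdiff
      rcases Nat.lt_succ_iff_lt_or_eq.mp (Nat.lt_succ_of_le htn) with htle | hteq
      · exact le_trans (hgb s t hst (by omega) hdiff) (le_max_left _ _)
      · subst hteq
        have hs0s : idx ≤ s := by
          by_contra hlt
          exact hminD s (by omega) (hdiff.trans (by rfl))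
        have : ((i+1 : Nat) : Int) - s ≤ (i : Int) - jv := by rw [hval]; omega
        exact le_trans this (le_max_right _ _)
    · rcases max_choice st.2.2.2 ((i : Int) - jv) with hm | hm
      · rw [hm]
        rcases hge with h0 | ⟨s, t, hst, htn, hdiff, hv⟩
        · exact Or.inl h0
        · exact Or.inr ⟨s, t, hst, by omega, hdiff, hv⟩
      · rw [hm, hval]
        exact Or.inr ⟨idx, i+1, by omega, le_refl _, hs0d, rfl⟩
  case h_2 heq =>
    have hfind : (List.range (i+1)).find? (fun k => pvD xs ys k == pvD xs ys (i+1)) = none := by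
      have := (hd (pvD xs ys (i+1))).symm.trans heq
      rcases hfv : (List.range (i+1)).find? (fun k => pvD xs ys k == pvD xs ys (i+1)) with _ | w
      · rfl
      · rw [hfv] at this; simp at this
    have hnone : ∀ s : Nat, s ≤ i → pvD xs ys s ≠ pvD xs ys (i+1) := by
      intro s hs hcontra
      rw [List.find?_eq_none] at hfind
      exact hfind s (List.mem_range.mpr (by omega)) (beq_iff_eq.mpr hcontra)
    refine ⟨hp1, hp2, ?_, hg0, ?_, ?_⟩
    · intro v
      rw [PySem.Dict.get?_insert, show i+1+1 = (i+1)+1 from rfl, List.range_succ,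
        List.find?_append]
      by_cases hv : v = pvD xs ys (i+1)
      · subst hv
        rw [hfind]
        simp [List.find?]
      · have hvne : ¬ (pvD xs ys (i+1) == v) = true := by
          intro hvv; exact hv (beq_iff_eq.mp hvv).symm
        rw [if_neg hv, hd v]
        rcases hfv : (List.range (i+1)).find? (fun k => pvD xs ys k == v) with _ | w
        · simp [List.find?, hvne]
        · simp
    · intro s t hst htn hdiff
      rcases Nat.lt_succ_iff_lt_or_eq.mp (Nat.lt_succ_of_le htn) with htle | hteq
      · exact hgb s t hst (by omega) hdiff
      · subst hteq
        exact absurd hdiff (hnone s (by omega))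
    · rcases hge with h0 | ⟨s, t, hst, htn, hdiff, hv⟩
      · exact Or.inl h0
      · exact Or.inr ⟨s, t, hst, by omega, hdiff, hv⟩

theorem pv_A_inv (xs ys : List Int) (i : Nat) :
    pvInvA xs ys i ((List.range i).foldl (pvStepA xs ys) pvInitA) := by
  induction i with
  | zero =>
    refine ⟨by simp [pvInitA], by simp [pvInitA], ?_, le_refl 0, ?_, Or.inl rfl⟩
    · intro v
      show ((PySem.Dict.empty).insert 0 (-1) : PySem.Dict Int Int).get? v = _
      rw [PySem.Dict.get?_insert]
      have h0 : pvD xs ys 0 = 0 := by simp [pvD]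
      by_cases hv : v = 0
      · subst hv; simp [List.range_one, h0]
      · simp [List.range_one, List.find?, h0, hv, Ne.symm hv, PySem.Dict.get?_empty]
    · intro s t hst htn; omega
  | succ i ih =>
    rw [List.range_succ, List.foldl_append, List.foldl_cons, List.foldl_nil]
    exact pv_stepA_spec xs ys _ i ih

theorem pv_A_good (xs ys : List Int) (hlen : xs.length = ys.length) :
    pvGood xs ys xs.length (longest_span xs ys) := by
  rw [pv_A_eq xs ys hlen]
  exact (pv_A_inv xs ys xs.length).2.2.2

-- ===== VERDICT (by name: the statement is the Claim_ definition above) =====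
theorem longest_span_spec : Claim_equal_longest_span := by
  intro xs ys _hdom hpre
  unfold Spec_longest_span
  exact pv_good_unique xs ys xs.length (pv_A_good xs ys hpre) (pv_alt_good xs ys hpre)
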